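-- pv_equiv track=rewrite | github.com/raliev/semantic_chunking | chunking_tree_v2.py | _combine_sentences
-- ===== SOURCE A (Python) =====
-- def _combine_sentences(sentences, buffer_size):
--     for i in range(len(sentences)):
--         combined_sentence = ''
--         for j in range(i - buffer_size, i):
--             if j >= 0:
--                 combined_sentence += str(sentences[j]['sentence']) + ' '
--         combined_sentence += str(sentences[i]['sentence'])
--         for j in range(i + 1, i + 1 + buffer_size):
--             if j < len(sentences):
--                 combined_sentence += ' ' + str(sentences[j]['sentence'])
--         sentences[i]['combined_sentence'] = combined_sentence
--     return sentences
-- ===== SOURCE B (Python) =====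
-- def _combine_sentences(sentences, buffer_size):
--     n = len(sentences)
--     radius = max(0, buffer_size)
--     parts = [[] for _ in range(n)]
--     for j, d in enumerate(sentences):
--         text = str(d['sentence'])
--         for i in range(max(0, j - radius), min(n, j + radius + 1)):
--             parts[i].append(text)
--     for d, p in zip(sentences, parts):
--         d['combined_sentence'] = ' '.join(p)
--     return sentences
-- ===== Notes on version B (the rewrite author's own statement) =====
-- stated objective: alternative
-- what changed: Inverts the traversal: instead of A's per-index gather with three guarded loops and repeated string +=, B does one scatter pass appending each sentence's text to the part-lists of every index in its clamped window, then joins each part-list once; Pre_ excludes inputs where some element lacks the 'sentence' key (both programs raise KeyError there).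
import Mathlib
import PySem

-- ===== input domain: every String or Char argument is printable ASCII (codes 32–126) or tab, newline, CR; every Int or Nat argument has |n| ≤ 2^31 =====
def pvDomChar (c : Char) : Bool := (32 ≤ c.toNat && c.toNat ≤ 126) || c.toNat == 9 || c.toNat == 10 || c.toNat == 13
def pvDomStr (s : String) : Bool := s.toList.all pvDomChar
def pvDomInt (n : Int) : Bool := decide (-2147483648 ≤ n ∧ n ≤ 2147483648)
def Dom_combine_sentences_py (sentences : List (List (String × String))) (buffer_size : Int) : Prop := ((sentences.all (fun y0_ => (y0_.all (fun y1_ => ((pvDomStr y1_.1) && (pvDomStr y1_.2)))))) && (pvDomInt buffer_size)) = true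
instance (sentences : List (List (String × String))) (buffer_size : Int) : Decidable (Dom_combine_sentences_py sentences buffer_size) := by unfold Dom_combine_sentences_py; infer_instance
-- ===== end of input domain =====

-- B inverts the traversal: one scatter pass appends each sentence's text to the part-lists of
-- every index in its clamped window, then one join per index (objective: alternative). Both
-- Pythons mutate the input dicts in place identically; the equivalence is about the return value.

-- ===== PORT A =====
-- d['sentence'] read via the dict view of the association list ("" default; KeyError excluded by Pre_)
def pvKey (d : List (String × String)) : String := (PySem.Dict.mk d).getD "sentence" ""

-- one iteration of A's outer loop: build combined_sentence for index i, store it at i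
def pvAStep (b : Int) (s : List (List (String × String))) (i : Int) : List (List (String × String)) :=
  let cs1 := (PySem.List.pyRange (i - b) i 1).foldl
      (fun acc j => if 0 ≤ j then acc ++ pvKey (PySem.List.pyGetD s j []) ++ " " else acc) ""
  let cs2 := cs1 ++ pvKey (PySem.List.pyGetD s i [])
  let cs3 := (PySem.List.pyRange (i + 1) (i + 1 + b) 1).foldl
      (fun acc j => if j < (s.length : Int) then acc ++ " " ++ pvKey (PySem.List.pyGetD s j []) else acc) cs2
  PySem.List.pySetD s i ((PySem.Dict.mk (PySem.List.pyGetD s i [])).insert "combined_sentence" cs3).items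

def combine_sentences_py (sentences : List (List (String × String))) (buffer_size : Int) : List (List (String × String)) :=
  (PySem.List.pyRange 0 (sentences.length : Int) 1).foldl (pvAStep buffer_size) sentences

-- ===== PORT B =====
-- one scatter step: append this sentence's text to parts[i] for every i in its clamped window
def pvScatterStep (n radius : Int) (parts : List (List String)) (p : Int × List (String × String)) : List (List String) :=
  let text := pvKey p.2
  (PySem.List.pyRange (max 0 (p.1 - radius)) (min n (p.1 + radius + 1)) 1).foldl
    (fun ps i => PySem.List.pySetD ps i (PySem.List.pyGetD ps i [] ++ [text])) parts

def combine_sentences_py_alt (sentences : List (List (String × String))) (buffer_size : Int) : List (List (String × String)) :=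
  let n : Int := (sentences.length : Int)
  let radius := max 0 buffer_size
  let parts0 : List (List String) := (List.range sentences.length).map (fun _ => [])
  let parts := (PySem.List.enumerate sentences 0).foldl (pvScatterStep n radius) parts0
  (sentences.zip parts).map (fun q =>
    ((PySem.Dict.mk q.1).insert "combined_sentence" (PySem.Str.join " " q.2)).items)

-- ===== PRECONDITION & SPEC =====
-- Pre_ excludes exactly the inputs where some element lacks the key "sentence": both Pythons raise KeyError there.
def Pre_combine_sentences_py (sentences : List (List (String × String))) (buffer_size : Int) : Prop :=
  ∀ d ∈ sentences, (PySem.Dict.mk d).contains "sentence" = true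
instance (sentences : List (List (String × String))) (buffer_size : Int) : Decidable (Pre_combine_sentences_py sentences buffer_size) := by unfold Pre_combine_sentences_py; infer_instance

def pvWitness_combine_sentences_py : (List (List (String × String))) × Int :=
  ([[("sentence", "hello")], [("sentence", "world")]], 1)

def Spec_combine_sentences_py (sentences : List (List (String × String))) (buffer_size : Int) (out : List (List (String × String))) : Prop := out = combine_sentences_py_alt sentences buffer_size
instance (sentences : List (List (String × String))) (buffer_size : Int) (out : List (List (String × String))) : Decidable (Spec_combine_sentences_py sentences buffer_size out) := by unfold Spec_combine_sentences_py; infer_instance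

-- ===== CLAIM (what is proved, stated in full; the proofs are below) =====
def Claim_equal_combine_sentences_py : Prop := ∀ (sentences : List (List (String × String))) (buffer_size : Int), Dom_combine_sentences_py sentences buffer_size → Pre_combine_sentences_py sentences buffer_size → Spec_combine_sentences_py sentences buffer_size (combine_sentences_py sentences buffer_size)

-- ===== LEMMAS AND PROOFS =====

-- the part-list at index i after the scatter pass has processed indices [0, c)
def pvW (texts : List String) (k c i : Int) : List String :=
  (PySem.List.pyRange (max 0 (i - k)) (min (min (texts.length : Int) (i + k + 1)) c) 1).map
    (fun j => PySem.List.pyGetD texts j "")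

-- the common closed form both ports are reduced to
def pvGatherForm (orig : List (List (String × String))) (b : Int) : List (List (String × String)) :=
  (PySem.List.enumerate orig 0).map (fun p =>
    ((PySem.Dict.mk p.2).insert "combined_sentence"
      (PySem.Str.join " " (pvW (orig.map pvKey) (max 0 b) (orig.length : Int) p.1))).items)

-- joining with " " : cons / singleton / snoc, at the String level
theorem pv_join_single (t : String) : PySem.Str.join " " [t] = t := by
  rw [← String.toList_inj, PySem.Str.toList_join]
  simp [PySem.Chars.join_singleton]

theorem pv_join_cons (t : String) (l : List String) (h : l ≠ []) :
    PySem.Str.join " " (t :: l) = t ++ " " ++ PySem.Str.join " " l := by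
  obtain ⟨q, rest, rfl⟩ : ∃ q rest, l = q :: rest := by
    cases l with | nil => exact absurd rfl h | cons q rest => exact ⟨q, rest, rfl⟩
  rw [← String.toList_inj, PySem.Str.toList_join]
  simp [PySem.Chars.join_cons_cons, PySem.Str.toList_join]

theorem pv_join_snoc (l : List String) (h : l ≠ []) (t : String) :
    PySem.Str.join " " l ++ " " ++ t = PySem.Str.join " " (l ++ [t]) := by
  induction l with
  | nil => exact absurd rfl h
  | cons q rest ih =>
    cases rest with
    | nil =>
      rw [pv_join_single]
      simp only [List.cons_append, List.nil_append]
      rw [pv_join_cons q [t] (by simp), pv_join_single]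
    | cons r rs =>
      simp only [List.cons_append]
      rw [pv_join_cons q (r :: rs) (by simp), pv_join_cons q (r :: (rs ++ [t])) (by simp)]
      rw [← List.cons_append, ← ih (by simp)]
      simp [String.append_assoc]

-- A's prefix loop, written over the list of strings it touches
theorem pv_foldA (p : List String) (c : String) (a0 : String) :
    p.foldl (fun a t => a ++ t ++ " ") a0 ++ c = a0 ++ PySem.Str.join " " (p ++ [c]) := by
  induction p generalizing a0 with
  | nil => simp [pv_join_single]
  | cons t p ih =>
    simp only [List.foldl_cons, List.cons_append, ih]
    rw [pv_join_cons t (p ++ [c]) (by simp)]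
    simp [String.append_assoc]

-- A's suffix loop
theorem pv_foldB (s : List String) (l : List String) (h : l ≠ []) :
    s.foldl (fun a t => a ++ " " ++ t) (PySem.Str.join " " l) = PySem.Str.join " " (l ++ s) := by
  induction s generalizing l with
  | nil => simp
  | cons t s ih =>
    simp only [List.foldl_cons]
    rw [pv_join_snoc l h t, ih (l ++ [t]) (by simp)]
    simp

-- a fold whose guard is false on every element is the identity
theorem pv_foldl_guard_false {α : Type} (l : List Int) (P : Int → Prop) [DecidablePred P]
    (f : α → Int → α) (a0 : α) (h : ∀ j ∈ l, ¬ P j) :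
    l.foldl (fun a j => if P j then f a j else a) a0 = a0 := by
  induction l generalizing a0 with
  | nil => rfl
  | cons x xs ih =>
    simp only [List.foldl_cons, if_neg (h x (by simp))]
    exact ih a0 fun j hj => h j (List.mem_cons_of_mem x hj)

-- a fold whose guard is true on every element drops its guard
theorem pv_foldl_guard_true {α : Type} (l : List Int) (P : Int → Prop) [DecidablePred P]
    (f : α → Int → α) (a0 : α) (h : ∀ j ∈ l, P j) :
    l.foldl (fun a j => if P j then f a j else a) a0 = l.foldl f a0 :=
  PySem.List.foldl_congr_mem l _ f a0 (fun _ x hx => if_pos (h x hx))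

-- pvKey read through pyGetD commutes with mapping pvKey over the list
theorem pv_key_pyGetD (s : List (List (String × String))) (j : Int) :
    pvKey (PySem.List.pyGetD s j []) = PySem.List.pyGetD (s.map pvKey) j "" := by
  have h := PySem.List.pyGetD_map pvKey s j []
  have h0 : pvKey ([] : List (String × String)) = "" := by decide
  rw [h0] at h
  exact h.symm

-- inserting "combined_sentence" does not change the "sentence" field
theorem pv_key_items (d : List (String × String)) (cs : String) :
    pvKey ((PySem.Dict.mk d).insert "combined_sentence" cs).items = pvKey d := by
  show (PySem.Dict.mk ((PySem.Dict.mk d).insert "combined_sentence" cs).items).getD "sentence" "" = _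
  have : PySem.Dict.mk ((PySem.Dict.mk d).insert "combined_sentence" cs).items
      = (PySem.Dict.mk d).insert "combined_sentence" cs := rfl
  rw [this, PySem.Dict.getD_insert]
  simp [pvKey]

theorem pv_gf_length (orig : List (List (String × String))) (b : Int) :
    (pvGatherForm orig b).length = orig.length := by
  simp [pvGatherForm, PySem.List.length_enumerate]

theorem pv_gf_getElem (orig : List (List (String × String))) (b : Int) (k : Nat)
    (hk : k < orig.length) :
    (pvGatherForm orig b)[k]'(by rw [pv_gf_length]; exact hk) =
      ((PySem.Dict.mk (orig[k]'hk)).insert "combined_sentence"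
        (PySem.Str.join " " (pvW (orig.map pvKey) (max 0 b) (orig.length : Int) (k : Int)))).items := by
  simp [pvGatherForm, PySem.List.getElem_enumerate]

theorem pv_map_key_gf (orig : List (List (String × String))) (b : Int) :
    (pvGatherForm orig b).map pvKey = orig.map pvKey := by
  apply List.ext_getElem
  · simp [pv_gf_length]
  · intro k h1 h2
    have hk : k < orig.length := by simpa [pv_gf_length] using h2
    simp only [List.getElem_map]
    rw [pv_gf_getElem orig b k hk, pv_key_items]

-- the combined string A builds at index i equals the join of the scatter window
theorem pv_cs_eq (texts : List String) (b i n lo hi : Int)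
    (hn : n = (texts.length : Int)) (h0i : 0 ≤ i) (hin : i < n)
    (hlo : lo = max 0 (i - max 0 b)) (hhi : hi = min n (i + max 0 b + 1)) :
    (PySem.List.pyRange (i + 1) (i + 1 + b) 1).foldl
      (fun acc j => if j < n then acc ++ " " ++ PySem.List.pyGetD texts j "" else acc)
      ((PySem.List.pyRange (i - b) i 1).foldl
          (fun acc j => if 0 ≤ j then acc ++ PySem.List.pyGetD texts j "" ++ " " else acc) ""
        ++ PySem.List.pyGetD texts i "")
    = PySem.Str.join " " ((PySem.List.pyRange lo hi 1).map (fun j => PySem.List.pyGetD texts j "")) := by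
  have hlo0 : 0 ≤ lo := by omega
  have hloi : lo ≤ i := by omega
  have hihi : i + 1 ≤ hi := by omega
  have hF5 : b ≤ 0 → i ≤ lo := by omega
  have hF6 : b ≤ 0 → hi ≤ i + 1 := by omega
  have hF7 : 0 ≤ b → i - b ≤ lo := by omega
  have hF10 : 0 ≤ b → hi ≤ i + 1 + b := by omega
  -- prefix loop = unguarded fold over [lo, i)
  have hpre : (PySem.List.pyRange (i - b) i 1).foldl
      (fun acc j => if 0 ≤ j then acc ++ PySem.List.pyGetD texts j "" ++ " " else acc) ""
      = (PySem.List.pyRange lo i 1).foldl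
        (fun acc j => acc ++ PySem.List.pyGetD texts j "" ++ " ") "" := by
    by_cases hb : b ≤ 0
    · rw [PySem.List.pyRange_one_eq_nil (by omega : i ≤ i - b),
        PySem.List.pyRange_one_eq_nil (hF5 hb)]
      rfl
    · rw [PySem.List.pyRange_one_append (i - b) lo i (hF7 (by omega)) hloi, List.foldl_append]
      rw [pv_foldl_guard_false _ (fun j => 0 ≤ j) _ ""
        (by intro j hj; rw [PySem.List.mem_pyRange_one] at hj; omega)]
      exact pv_foldl_guard_true _ (fun j => 0 ≤ j) _ ""
        (by intro j hj; rw [PySem.List.mem_pyRange_one] at hj; omega)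
  -- suffix loop = unguarded fold over [i+1, hi)
  have hsuf : ∀ (a0 : String), (PySem.List.pyRange (i + 1) (i + 1 + b) 1).foldl
      (fun acc j => if j < n then acc ++ " " ++ PySem.List.pyGetD texts j "" else acc) a0
      = (PySem.List.pyRange (i + 1) hi 1).foldl
        (fun acc j => acc ++ " " ++ PySem.List.pyGetD texts j "") a0 := by
    intro a0
    by_cases hb : b ≤ 0
    · rw [PySem.List.pyRange_one_eq_nil (by omega : i + 1 + b ≤ i + 1),
        PySem.List.pyRange_one_eq_nil (hF6 hb)]
      rfl
    · rw [PySem.List.pyRange_one_append (i + 1) hi (i + 1 + b) (by omega) (hF10 (by omega)),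
        List.foldl_append]
      rw [pv_foldl_guard_true _ (fun j => j < n) _ a0
        (by intro j hj; rw [PySem.List.mem_pyRange_one] at hj; omega)]
      exact pv_foldl_guard_false _ (fun j => j < n) _ _
        (by intro j hj; rw [PySem.List.mem_pyRange_one] at hj; omega)
  rw [hpre, hsuf]
  -- turn the folds over index ranges into folds over the string lists
  rw [show (PySem.List.pyRange lo i 1).foldl
      (fun acc j => acc ++ PySem.List.pyGetD texts j "" ++ " ") ""
      = ((PySem.List.pyRange lo i 1).map (fun j => PySem.List.pyGetD texts j "")).foldl
        (fun a t => a ++ t ++ " ") "" from by rw [List.foldl_map]]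
  rw [show ∀ (a0 : String), (PySem.List.pyRange (i + 1) hi 1).foldl
      (fun acc j => acc ++ " " ++ PySem.List.pyGetD texts j "") a0
      = ((PySem.List.pyRange (i + 1) hi 1).map (fun j => PySem.List.pyGetD texts j "")).foldl
        (fun a t => a ++ " " ++ t) a0 from fun a0 => by rw [List.foldl_map]]
  rw [pv_foldA _ (PySem.List.pyGetD texts i "") ""]
  rw [show ("" : String) ++ PySem.Str.join " "
      ((PySem.List.pyRange lo i 1).map (fun j => PySem.List.pyGetD texts j "")
        ++ [PySem.List.pyGetD texts i ""])
      = PySem.Str.join " "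
      ((PySem.List.pyRange lo i 1).map (fun j => PySem.List.pyGetD texts j "")
        ++ [PySem.List.pyGetD texts i ""]) from by rw [← String.toList_inj]; simp]
  rw [pv_foldB _ _ (by simp)]
  -- the three window pieces glue into one range
  have hsing : [PySem.List.pyGetD texts i ""] =
      (PySem.List.pyRange i (i + 1) 1).map (fun j => PySem.List.pyGetD texts j "") := by
    rw [PySem.List.pyRange_one_cons (by omega), PySem.List.pyRange_one_eq_nil (by omega)]
    simp
  rw [hsing, ← List.map_append, ← List.map_append]
  congr 1
  rw [List.append_assoc,
      ← PySem.List.pyRange_one_append i (i + 1) hi (by omega) (by omega),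
      ← PySem.List.pyRange_one_append lo i hi (by omega) (by omega)]

-- A's loop, started from a partially rewritten list, lands on the common closed form
theorem pv_loop (orig : List (List (String × String))) (b : Int) :
    ∀ (m k : Nat), k + m = orig.length →
    (PySem.List.pyRange (k : Int) (orig.length : Int) 1).foldl (pvAStep b)
        ((pvGatherForm orig b).take k ++ orig.drop k)
      = pvGatherForm orig b := by
  intro m
  induction m with
  | zero =>
    intro k hk
    rw [PySem.List.pyRange_one_eq_nil (by omega)]
    simp only [List.foldl_nil]
    rw [List.drop_eq_nil_of_le (by omega), List.take_of_length_le (by rw [pv_gf_length]; omega)]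
    simp
  | succ m ih =>
    intro k hk
    have hklen : k < orig.length := by omega
    rw [PySem.List.pyRange_one_cons (by exact_mod_cast hklen), List.foldl_cons]
    have htl : ((pvGatherForm orig b).take k).length = k := by
      rw [List.length_take, pv_gf_length]
      omega
    have hstep : pvAStep b ((pvGatherForm orig b).take k ++ orig.drop k) (k : Int)
        = (pvGatherForm orig b).take (k + 1) ++ orig.drop (k + 1) := by
      set s := (pvGatherForm orig b).take k ++ orig.drop k with hs
      have hsl : s.length = orig.length := by
        rw [hs]
        simp only [List.length_append, List.length_take, List.length_drop, pv_gf_length]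
        omega
      have hmap : s.map pvKey = orig.map pvKey := by
        rw [hs, List.map_append, List.map_take, List.map_drop, pv_map_key_gf]
        exact List.take_append_drop k (orig.map pvKey)
      have hsk : PySem.List.pyGetD s (k : Int) [] = orig[k] := by
        rw [PySem.List.pyGetD_natCast, List.getD_eq_getElem?_getD, hs,
          List.getElem?_append_right (by rw [htl])]
        rw [htl, Nat.sub_self, List.getElem?_drop, Nat.add_zero,
          List.getElem?_eq_getElem hklen]
        rfl
      unfold pvAStep
      simp only [pv_key_pyGetD, hmap, hsl]
      have hcs := pv_cs_eq (orig.map pvKey) b (k : Int) (orig.length : Int)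
        (max 0 ((k : Int) - max 0 b)) (min (orig.length : Int) ((k : Int) + max 0 b + 1))
        (by simp) (by positivity) (by exact_mod_cast hklen) rfl rfl
      rw [hcs, hsk]
      rw [PySem.List.pySetD_natCast, hs]
      rw [List.set_append, if_neg (by omega), htl, Nat.sub_self]
      rw [List.drop_eq_getElem_cons hklen, List.set_cons_zero]
      rw [List.take_add_one, List.getElem?_eq_getElem (by rw [pv_gf_length]; exact hklen)]
      rw [pv_gf_getElem orig b k hklen]
      have hwin : (PySem.List.pyRange (max 0 ((k : Int) - max 0 b))
            (min (orig.length : Int) ((k : Int) + max 0 b + 1)) 1).map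
            (fun j => PySem.List.pyGetD (orig.map pvKey) j "")
          = pvW (orig.map pvKey) (max 0 b) (orig.length : Int) (k : Int) := by
        unfold pvW
        congr 2
        simp only [List.length_map]
        omega
      rw [hwin]
      simp
    rw [hstep]
    have h2 := ih (k + 1) (by omega)
    have hc : ((k : Int) + 1) = (((k + 1 : Nat)) : Int) := by push_cast; ring
    rw [hc]
    exact h2

-- the inner scatter fold, characterised pointwise
theorem pv_scatter_inner (t : String) : ∀ (m : Nat) (a b : Int) (parts : List (List String)),
    0 ≤ a → a + m = b → b ≤ (parts.length : Int) →
    (PySem.List.pyRange a b 1).foldl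
        (fun ps i => PySem.List.pySetD ps i (PySem.List.pyGetD ps i [] ++ [t])) parts
      = parts.mapIdx (fun i x => if a ≤ (i : Int) ∧ (i : Int) < b then x ++ [t] else x) := by
  intro m
  induction m with
  | zero =>
    intro a b parts ha hab hb
    rw [PySem.List.pyRange_one_eq_nil (by omega)]
    simp only [List.foldl_nil]
    apply List.ext_getElem
    · simp
    · intro i h1 h2
      rw [List.getElem_mapIdx, if_neg (by omega)]
  | succ m ih =>
    intro a b parts ha hab hb
    rw [PySem.List.pyRange_one_cons (by omega), List.foldl_cons]
    have halen : a.toNat < parts.length := by omega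
    have hget : PySem.List.pyGetD parts a [] = parts[a.toNat] :=
      PySem.List.pyGetD_eq_getElem parts [] ha (by omega)
    rw [PySem.List.pySetD_of_nonneg _ _ ha, hget]
    rw [ih (a + 1) b _ (by omega) (by omega) (by rw [List.length_set]; omega)]
    apply List.ext_getElem
    · simp
    · intro i h1 h2
      have hil : i < parts.length := by simpa using h2
      rw [List.getElem_mapIdx, List.getElem_mapIdx]
      by_cases hia : i = a.toNat
      · subst hia
        rw [if_neg (by omega), if_pos (by omega), List.getElem_set_self]
      · have hne : (i : Int) ≠ a := by omega
        rw [List.getElem_set_ne (by omega)]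
        by_cases hc : a + 1 ≤ (i : Int) ∧ (i : Int) < b
        · rw [if_pos hc, if_pos (by omega)]
        · rw [if_neg hc, if_neg (by omega)]

-- the full parts state after the scatter pass has processed indices [0, c)
def pvParts (texts : List String) (k c : Int) : List (List String) :=
  (PySem.List.pyRange 0 (texts.length : Int) 1).map (fun i => pvW texts k c i)

theorem pvParts_length (texts : List String) (k c : Int) :
    (pvParts texts k c).length = texts.length := by
  simp [pvParts, PySem.List.length_pyRange_one]

theorem pvParts_getElem (texts : List String) (k c : Int) (i : Nat) (hi : i < texts.length) :
    (pvParts texts k c)[i]'(by rw [pvParts_length]; exact hi) = pvW texts k c (i : Int) := by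
  simp only [pvParts, List.getElem_map, PySem.List.getElem_pyRange_one, zero_add]

-- the scatter pass over the remaining suffix completes the windows
theorem pv_scatter_outer (orig : List (List (String × String))) (k : Int) (hk : 0 ≤ k) :
    ∀ (m c : Nat), c + m = orig.length →
    (PySem.List.enumerate (orig.drop c) (c : Int)).foldl
        (pvScatterStep (orig.length : Int) k) (pvParts (orig.map pvKey) k (c : Int))
      = pvParts (orig.map pvKey) k (orig.length : Int) := by
  intro m
  induction m with
  | zero =>
    intro c hc
    obtain rfl : c = orig.length := by omega
    rw [List.drop_eq_nil_of_le (by omega)]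
    rfl
  | succ m ih =>
    intro c hc
    have hcl : c < orig.length := by omega
    have hlen : (orig.map pvKey).length = orig.length := by simp
    rw [List.drop_eq_getElem_cons hcl, PySem.List.enumerate_cons, List.foldl_cons]
    have hstep : pvScatterStep (orig.length : Int) k (pvParts (orig.map pvKey) k (c : Int))
          ((c : Int), orig[c])
        = pvParts (orig.map pvKey) k ((c : Int) + 1) := by
      unfold pvScatterStep
      rw [pv_scatter_inner (pvKey orig[c])
        ((min (orig.length : Int) ((c : Int) + k + 1)) - max 0 ((c : Int) - k)).toNat
        (max 0 ((c : Int) - k)) (min (orig.length : Int) ((c : Int) + k + 1)) _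
        (by omega) (by omega) (by rw [pvParts_length, hlen]; omega)]
      apply List.ext_getElem
      · rw [List.length_mapIdx, pvParts_length, pvParts_length]
      · intro i h1 h2
        have hil : i < orig.length := by
          have := h2; rw [pvParts_length, hlen] at this; exact this
        rw [List.getElem_mapIdx]
        rw [pvParts_getElem (orig.map pvKey) k (c : Int) i (by rw [hlen]; exact hil),
          pvParts_getElem (orig.map pvKey) k ((c : Int) + 1) i (by rw [hlen]; exact hil)]
        have htc : PySem.List.pyGetD (orig.map pvKey) (c : Int) "" = pvKey orig[c] := by
          rw [PySem.List.pyGetD_natCast, List.getD_eq_getElem?_getD,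
            List.getElem?_eq_getElem (by rw [hlen]; exact hcl)]
          simp
        by_cases hc2 : max 0 ((c : Int) - k) ≤ (i : Int) ∧ (i : Int) < min (orig.length : Int) ((c : Int) + k + 1)
        · rw [if_pos hc2]
          unfold pvW
          rw [hlen]
          have hu2 : min (min (orig.length : Int) ((i : Int) + k + 1)) ((c : Int) + 1) = (c : Int) + 1 := by omega
          have hu3 : min (min (orig.length : Int) ((i : Int) + k + 1)) (c : Int) = (c : Int) := by omega
          rw [hu2, hu3,
            PySem.List.pyRange_one_append (max 0 ((i : Int) - k)) (c : Int) ((c : Int) + 1) (by omega) (by omega),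
            PySem.List.pyRange_one_singleton, List.map_append]
          simp only [List.map_cons, List.map_nil]
          rw [htc]
        · rw [if_neg hc2]
          unfold pvW
          rw [hlen]
          by_cases hcase : (c : Int) < max 0 ((i : Int) - k)
          · rw [PySem.List.pyRange_one_eq_nil (by omega), PySem.List.pyRange_one_eq_nil (by omega)]
          · have heq : min (min (orig.length : Int) ((i : Int) + k + 1)) ((c : Int) + 1)
                = min (min (orig.length : Int) ((i : Int) + k + 1)) (c : Int) := by omega
            rw [heq]
    rw [hstep]
    have h2 := ih (c + 1) (by omega)
    have hc1 : ((c : Int) + 1) = (((c + 1 : Nat)) : Int) := by push_cast; ring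
    rw [hc1]
    exact h2

-- B's port equals the common closed form
theorem pv_alt_eq_gf (orig : List (List (String × String))) (b : Int) :
    combine_sentences_py_alt orig b = pvGatherForm orig b := by
  have hlen : (orig.map pvKey).length = orig.length := by simp
  have hzero : (List.range orig.length).map (fun _ => ([] : List String))
      = pvParts (orig.map pvKey) (max 0 b) ((0 : Nat) : Int) := by
    apply List.ext_getElem
    · rw [List.length_map, List.length_range, pvParts_length, hlen]
    · intro i h1 h2
      have hil : i < orig.length := by simpa using h1
      rw [List.getElem_map, pvParts_getElem (orig.map pvKey) (max 0 b) _ i (by rw [hlen]; exact hil)]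
      unfold pvW
      rw [PySem.List.pyRange_one_eq_nil (by omega)]
      simp
  have hparts := pv_scatter_outer orig (max 0 b) (by omega) orig.length 0 (by omega)
  rw [List.drop_zero] at hparts
  simp only [combine_sentences_py_alt]
  rw [show ((0 : Nat) : Int) = (0 : Int) from rfl] at hzero hparts
  rw [hzero, hparts]
  unfold pvGatherForm
  apply List.ext_getElem
  · rw [List.length_map, List.length_zip, pvParts_length, hlen, List.length_map,
      PySem.List.length_enumerate]
    omega
  · intro i h1 h2
    have hil : i < orig.length := by
      rw [List.length_map, PySem.List.length_enumerate] at h2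
      exact h2
    rw [List.getElem_map, List.getElem_map, List.getElem_zip, PySem.List.getElem_enumerate]
    rw [pvParts_getElem (orig.map pvKey) (max 0 b) _ i (by rw [hlen]; exact hil)]
    simp

-- ===== VERDICT (by name: the statement is the Claim_ definition above) =====
theorem combine_sentences_py_spec : Claim_equal_combine_sentences_py := by
  intro sentences buffer_size _ _
  show combine_sentences_py sentences buffer_size = combine_sentences_py_alt sentences buffer_size
  rw [pv_alt_eq_gf]
  have h := pv_loop sentences buffer_size sentences.length 0 (by omega)
  simpa [combine_sentences_py] using h
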